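-- pv_equiv track=rewrite | github.com/rhkdguskim/Study | 백준/Gold/17609. 회문/회문.py | solve
-- ===== SOURCE A (Python) =====
-- def is_palindrome(w, left, right):
--     while left < right:
--         if w[left] != w[right]:
--             return False
--         left += 1
--         right -= 1
--     return True
--
-- def solve(w):
--     left, right = 0, len(w) - 1
--     while left < right:
--         if w[left] == w[right]:
--             left += 1
--             right -= 1
--         else:
--             remove_left = is_palindrome(w, left + 1, right)
--             remove_right = is_palindrome(w, left, right - 1)
--             if remove_left or remove_right:
--                 return 1
--             else:
--                 return 2
--     return 0
-- ===== SOURCE B (Python) =====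
-- def solve(w):
--     r = w[::-1]
--     if w == r:
--         return 0
--     i = next(k for k, (a, b) in enumerate(zip(w, r)) if a != b)
--     left, right = i, len(w) - 1 - i
--     s1 = w[left + 1:right + 1]
--     s2 = w[left:right]
--     return 1 if s1 == s1[::-1] or s2 == s2[::-1] else 2
-- ===== Notes on version B (the rewrite author's own statement) =====
-- stated objective: idiomatic
-- what changed: Instead of an integrated two-pointer loop that calls an index-based palindrome helper at the mismatch, B does an up-front whole-string reverse compare (return 0), then locates the first mismatching position against the reversed string and tests the two candidate substrings by slice reversal.
import Mathlib
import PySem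

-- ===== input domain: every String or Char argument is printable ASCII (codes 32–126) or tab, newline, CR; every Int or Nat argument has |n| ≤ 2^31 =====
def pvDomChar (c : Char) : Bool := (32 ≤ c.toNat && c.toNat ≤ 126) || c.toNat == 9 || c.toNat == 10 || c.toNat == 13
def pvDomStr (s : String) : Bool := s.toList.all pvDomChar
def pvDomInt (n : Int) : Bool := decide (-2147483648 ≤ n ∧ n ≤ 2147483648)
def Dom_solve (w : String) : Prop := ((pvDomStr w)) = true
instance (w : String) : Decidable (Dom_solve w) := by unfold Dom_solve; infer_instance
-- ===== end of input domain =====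

-- B replaces A's integrated two-pointer loop + index-based palindrome helper by a whole-string
-- reverse compare followed by a first-mismatch locate and slice-reversal tests (idiomatic, same cost).


-- ===== PORT A =====
-- is_palindrome(w, left, right)
def isPalA (l : List Char) (left right : Int) : Bool :=
  if left < right then
    if PySem.List.pyGet? l left ≠ PySem.List.pyGet? l right then false
    else isPalA l (left + 1) (right - 1)
  else true
termination_by (right - left).toNat
decreasing_by omega

-- the while-loop of solve, state (left, right)
def solveLoopA (l : List Char) (left right : Int) : Int :=
  if left < right then
    if PySem.List.pyGet? l left = PySem.List.pyGet? l right then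
      solveLoopA l (left + 1) (right - 1)
    else if isPalA l (left + 1) right || isPalA l left (right - 1) then 1 else 2
  else 0
termination_by (right - left).toNat
decreasing_by omega

def solve (w : String) : Int := solveLoopA w.toList 0 (PySem.Str.len w - 1)

-- ===== PORT B =====
def solve_alt (w : String) : Int :=
  let l := w.toList
  let r := l.reverse
  if l = r then 0
  else
    let i : Nat := ((l.zip r).findIdx? (fun p => p.1 ≠ p.2)).getD 0
    let left : Int := (i : Int)
    let right : Int := PySem.Str.len w - 1 - (i : Int)
    let s1 := PySem.List.slice l (some (left + 1)) (some (right + 1))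
    let s2 := PySem.List.slice l (some left) (some right)
    if s1 = s1.reverse ∨ s2 = s2.reverse then 1 else 2

-- ===== PRECONDITION & SPEC =====
def Spec_solve (w : String) (out : Int) : Prop := out = solve_alt w
instance (w : String) (out : Int) : Decidable (Spec_solve w out) := by unfold Spec_solve; infer_instance

-- ===== CLAIM (what is proved, stated in full; the proofs are below) =====
def Claim_equal_solve : Prop := ∀ (w : String), Dom_solve w → Spec_solve w (solve w)

-- ===== LEMMAS AND PROOFS =====

-- a list of length ≤ 1 is a palindrome
lemma pal_short (s : List Char) (h : s.length ≤ 1) : s = s.reverse := by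
  match s, h with
  | [], _ => rfl
  | [a], _ => rfl

-- peeling both ends off a palindrome test
lemma pal_cons_append (x y : Char) (m : List Char) :
    ((x :: (m ++ [y])) = (x :: (m ++ [y])).reverse) ↔ (x = y ∧ m = m.reverse) := by
  rw [List.reverse_cons, List.reverse_append]
  simp only [List.reverse_cons, List.reverse_nil, List.nil_append, List.cons_append]
  constructor
  · intro h
    rw [List.cons_eq_cons] at h
    obtain ⟨hx, h2⟩ := h
    subst hx
    exact ⟨rfl, (List.append_inj' h2 rfl).1⟩
  · rintro ⟨hx, hm⟩
    subst hx
    rw [List.cons_eq_cons]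
    exact ⟨rfl, by rw [← hm]⟩

-- the inclusive segment [a,b] decomposed as first element, middle, last element
lemma seg_decomp (l : List Char) (a b : Nat) (hab : a < b) (hb : b < l.length) :
    (l.drop a).take (b + 1 - a) =
      l[a]'(by omega) :: (((l.drop (a+1)).take (b - a - 1)) ++ [l[b]'hb]) := by
  have h1 : b + 1 - a = (b - a - 1) + 1 + 1 := by omega
  rw [List.drop_eq_getElem_cons (show a < l.length by omega), h1, List.take_succ_cons,
    List.take_add_one, List.getElem?_drop]
  have hb' : a + 1 + (b - a - 1) = b := by omega
  rw [hb', List.getElem?_eq_getElem hb]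
  rfl

-- is_palindrome(w, a, b) decides whether the inclusive segment w[a..b] is a palindrome
lemma isPal_seg (l : List Char) :
    ∀ (d a b : Nat), b - a ≤ d → b < l.length →
    isPalA l a b = decide (((l.drop a).take (b + 1 - a)) = ((l.drop a).take (b + 1 - a)).reverse) := by
  have short : ∀ (a b : Nat), b ≤ a →
      isPalA l a b = decide (((l.drop a).take (b + 1 - a)) = ((l.drop a).take (b + 1 - a)).reverse) := by
    intro a b hba
    rw [isPalA, if_neg (by omega)]
    have hlen : ((l.drop a).take (b + 1 - a)).length ≤ 1 := by
      simp only [List.length_take, List.length_drop]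
      omega
    exact (decide_eq_true (pal_short _ hlen)).symm
  intro d
  induction d with
  | zero =>
    intro a b hd _
    exact short a b (by omega)
  | succ d ih =>
    intro a b hd hb
    by_cases hab' : a < b
    · rw [isPalA, if_pos (by exact_mod_cast hab')]
      have ha : a < l.length := by omega
      rw [PySem.List.pyGet?_natCast, PySem.List.pyGet?_natCast,
        List.getElem?_eq_getElem ha, List.getElem?_eq_getElem hb]
      rw [seg_decomp l a b hab' hb]
      by_cases hxy : l[a]'ha = l[b]'hb
      · rw [if_neg (by simp [hxy])]
        have h1 : (a : Int) + 1 = ((a+1 : Nat) : Int) := by omega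
        have h2 : (b : Int) - 1 = ((b-1 : Nat) : Int) := by omega
        rw [h1, h2, ih (a+1) (b-1) (by omega) (by omega)]
        have h3 : (b - 1) + 1 - (a + 1) = b - a - 1 := by omega
        rw [h3, decide_eq_decide, pal_cons_append]
        simp [hxy]
      · rw [if_pos (by simp [hxy])]
        have hnot : ¬ (l[a]'ha :: (((l.drop (a+1)).take (b - a - 1)) ++ [l[b]'hb]) =
            (l[a]'ha :: (((l.drop (a+1)).take (b - a - 1)) ++ [l[b]'hb])).reverse) := by
          rw [pal_cons_append]
          simp [hxy]
        exact (decide_eq_false hnot).symm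
    · exact short a b (by omega)

-- when the whole list is a palindrome, A's main loop returns 0 from any state (j, n-1-j)
lemma loop_pal (l : List Char) (hpal : l = l.reverse) :
    ∀ (d j : Nat), l.length - 1 - j - j ≤ d →
    solveLoopA l j ((l.length : Int) - 1 - j) = 0 := by
  have hall : ∀ (k : Nat) (hk : k < l.length), l[k] = l[l.length - 1 - k]'(by omega) := by
    intro k hk
    exact (List.getElem_of_eq hpal hk).trans (List.getElem_reverse _)
  intro d
  induction d with
  | zero =>
    intro j hd
    rw [solveLoopA, if_neg (by omega)]
  | succ d ih =>
    intro j hd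
    by_cases hj : (j : Int) < (l.length : Int) - 1 - j
    · rw [solveLoopA, if_pos hj]
      have hj1 : j < l.length := by omega
      have heq : ((l.length : Int) - 1 - j) = ((l.length - 1 - j : Nat) : Int) := by omega
      rw [heq, PySem.List.pyGet?_natCast, PySem.List.pyGet?_natCast,
        List.getElem?_eq_getElem hj1, List.getElem?_eq_getElem (by omega)]
      rw [if_pos (by rw [hall j hj1])]
      have h1 : (j : Int) + 1 = ((j+1 : Nat) : Int) := by omega
      have h2 : ((l.length - 1 - j : Nat) : Int) - 1 = (l.length : Int) - 1 - ((j+1 : Nat) : Int) := by omega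
      rw [h1, h2]
      exact ih (j+1) (by omega)
    · rw [solveLoopA, if_neg hj]

-- when the first mismatch is at i, A's main loop from any state (j, n-1-j) with j ≤ i
-- reaches i and returns the 1/2 decision taken there
lemma loop_mis (l : List Char) (i : Nat) (hi : 2 * i + 2 ≤ l.length)
    (hne : l[i]'(by omega) ≠ l[l.length - 1 - i]'(by omega))
    (hmin : ∀ (k : Nat) (hk : k < i), l[k]'(by omega) = l[l.length - 1 - k]'(by omega)) :
    ∀ (d j : Nat), j ≤ i → i - j ≤ d →
    solveLoopA l j ((l.length : Int) - 1 - j) =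
      (if isPalA l ((i : Int) + 1) ((l.length : Int) - 1 - i) ||
          isPalA l i ((l.length : Int) - 1 - i - 1) then 1 else 2) := by
  have hat : solveLoopA l i ((l.length : Int) - 1 - i) =
      (if isPalA l ((i : Int) + 1) ((l.length : Int) - 1 - i) ||
          isPalA l i ((l.length : Int) - 1 - i - 1) then 1 else 2) := by
    rw [solveLoopA, if_pos (by omega)]
    have heq : ((l.length : Int) - 1 - i) = ((l.length - 1 - i : Nat) : Int) := by omega
    rw [heq, PySem.List.pyGet?_natCast, PySem.List.pyGet?_natCast,
      List.getElem?_eq_getElem (by omega), List.getElem?_eq_getElem (by omega)]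
    rw [if_neg (by simp [hne])]
  intro d
  induction d with
  | zero =>
    intro j hji hd
    have : j = i := by omega
    subst this
    exact hat
  | succ d ih =>
    intro j hji hd
    rcases Nat.eq_or_lt_of_le hji with h | h
    · subst h
      exact hat
    · rw [solveLoopA, if_pos (by omega)]
      have heq : ((l.length : Int) - 1 - j) = ((l.length - 1 - j : Nat) : Int) := by omega
      rw [heq, PySem.List.pyGet?_natCast, PySem.List.pyGet?_natCast,
        List.getElem?_eq_getElem (by omega), List.getElem?_eq_getElem (by omega)]
      rw [if_pos (by rw [hmin j h])]
      have h1 : (j : Int) + 1 = ((j+1 : Nat) : Int) := by omega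
      have h2 : ((l.length - 1 - j : Nat) : Int) - 1 = (l.length : Int) - 1 - ((j+1 : Nat) : Int) := by omega
      rw [h1, h2]
      exact ih (j+1) (by omega) (by omega)

-- ===== VERDICT (by name: the statement is the Claim_ definition above) =====
theorem solve_spec : Claim_equal_solve := by
  intro w _
  show solve w = solve_alt w
  simp only [solve, solve_alt, PySem.Str.len_eq]
  by_cases hpal : w.toList = w.toList.reverse
  · rw [if_pos hpal]
    have h0 := loop_pal w.toList hpal w.toList.length 0 (by omega)
    simpa using h0
  · rw [if_neg hpal]
    rcases hfi : (w.toList.zip w.toList.reverse).findIdx? (fun p => decide (p.1 ≠ p.2)) with _ | i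
    · exfalso
      rw [List.findIdx?_eq_none_iff] at hfi
      apply hpal
      apply List.ext_getElem (by simp)
      intro k hk hk'
      have hmem : (w.toList[k], w.toList.reverse[k]'hk') ∈ w.toList.zip w.toList.reverse := by
        have hkz : k < (w.toList.zip w.toList.reverse).length := by rw [List.length_zip, List.length_reverse]; omega
        have := List.getElem_mem hkz
        rwa [List.getElem_zip] at this
      have := hfi _ hmem
      simpa using this
    · -- first mismatch at i
      obtain ⟨hilen, hp, hmin0⟩ := List.findIdx?_eq_some_iff_getElem.mp hfi
      have hin : i < w.toList.length := by
        simp only [List.length_zip, List.length_reverse, min_self] at hilen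
        exact hilen
      rw [List.getElem_zip] at hp
      simp only [decide_eq_true_eq] at hp
      rw [List.getElem_reverse] at hp
      have hmin : ∀ (k : Nat) (hk : k < i),
          w.toList[k]'(by omega) = w.toList[w.toList.length - 1 - k]'(by omega) := by
        intro k hk
        have := hmin0 k hk
        rw [List.getElem_zip] at this
        simp only [decide_eq_true_eq, not_not] at this
        rw [List.getElem_reverse] at this
        exact this
      -- the first mismatch lies strictly in the first half
      have hhalf : 2 * i + 2 ≤ w.toList.length := by
        rcases Nat.lt_trichotomy i (w.toList.length - 1 - i) with h | h | h
        · omega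
        · exfalso
          exact hp (by congr 1)
        · exfalso
          have he : w.toList.length - 1 - (w.toList.length - 1 - i) = i := by omega
          have hk : w.toList[w.toList.length - 1 - i]? =
              w.toList[w.toList.length - 1 - (w.toList.length - 1 - i)]? := by
            rw [List.getElem?_eq_getElem (by omega), List.getElem?_eq_getElem (by omega)]
            exact congrArg some (hmin (w.toList.length - 1 - i) (by omega))
          rw [he, List.getElem?_eq_getElem (by omega), List.getElem?_eq_getElem hin] at hk
          exact hp (Option.some.inj hk).symm
      have hA := loop_mis w.toList i hhalf hp hmin i 0 (by omega) (by omega)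
      simp only [Nat.cast_zero, sub_zero] at hA
      rw [hfi, hA]
      simp only [Option.getD_some]
      have e1 : ((i : Int) + 1) = ((i + 1 : Nat) : Int) := by omega
      have e2 : ((w.toList.length : Int) - 1 - i) = ((w.toList.length - 1 - i : Nat) : Int) := by omega
      have e3 : ((w.toList.length : Int) - 1 - i - 1) = ((w.toList.length - 2 - i : Nat) : Int) := by omega
      have e5 : ((w.toList.length : Int) - 1 - (i : Int) + 1) = ((w.toList.length - i : Nat) : Int) := by omega
      have q1 : isPalA w.toList ((i : Int) + 1) ((w.toList.length : Int) - 1 - i) =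
          decide (((w.toList.drop (i+1)).take ((w.toList.length - 1 - i) + 1 - (i+1))) =
            ((w.toList.drop (i+1)).take ((w.toList.length - 1 - i) + 1 - (i+1))).reverse) := by
        rw [e1, e2]
        exact isPal_seg w.toList w.toList.length (i+1) (w.toList.length - 1 - i) (by omega) (by omega)
      have q2 : isPalA w.toList (i : Int) ((w.toList.length : Int) - 1 - i - 1) =
          decide (((w.toList.drop i).take ((w.toList.length - 2 - i) + 1 - i)) =
            ((w.toList.drop i).take ((w.toList.length - 2 - i) + 1 - i)).reverse) := by
        rw [e3]
        exact isPal_seg w.toList w.toList.length i (w.toList.length - 2 - i) (by omega) (by omega)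
      have s1eq : PySem.List.slice w.toList (some ((i : Int) + 1))
            (some ((w.toList.length : Int) - 1 - (i : Int) + 1)) =
          (w.toList.drop (i+1)).take ((w.toList.length - 1 - i) + 1 - (i+1)) := by
        rw [e1, e5, PySem.List.slice_natCast]
        congr 1
        omega
      have s2eq : PySem.List.slice w.toList (some ((i : Int)))
            (some ((w.toList.length : Int) - 1 - (i : Int))) =
          (w.toList.drop i).take ((w.toList.length - 2 - i) + 1 - i) := by
        rw [e2, PySem.List.slice_natCast]
        congr 1
        omega
      rw [q1, q2]
      simp only [s1eq, s2eq, Bool.or_eq_true, decide_eq_true_eq]
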